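-- pv_equiv track=rewrite | github.com/jumaluwati/Compliance_Checker | compliance.py | parse_interfaces
-- ===== SOURCE A (Python) =====
-- def parse_interfaces(config):
--     interfaces = {}
--     current_interface = None
--
--     for line in config.splitlines():
--         line = line.strip()
--         if line.startswith("interface"):
--             current_interface = line
--             interfaces[current_interface] = []
--         elif current_interface and line:
--             interfaces[current_interface].append(line)
--
--     return interfaces
-- ===== SOURCE B (Python) =====
-- def parse_interfaces(config):
--     lines = [line.strip() for line in config.splitlines()]
--     n = len(lines)
--     result = {}
--     i = 0
--     while i < n:
--         if lines[i].startswith("interface"):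
--             j = i + 1
--             while j < n and not lines[j].startswith("interface"):
--                 j += 1
--             result[lines[i]] = [l for l in lines[i + 1:j] if l]
--             i = j
--         else:
--             i += 1
--     return result
-- ===== Notes on version B (the rewrite author's own statement) =====
-- stated objective: alternative
-- what changed: A keeps a running current-interface register and appends each config line to the dict entry one by one; B strips all lines once, then for each header line scans forward to the next header and builds that section's whole dict entry at once from the slice of non-empty lines.
import Mathlib
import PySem

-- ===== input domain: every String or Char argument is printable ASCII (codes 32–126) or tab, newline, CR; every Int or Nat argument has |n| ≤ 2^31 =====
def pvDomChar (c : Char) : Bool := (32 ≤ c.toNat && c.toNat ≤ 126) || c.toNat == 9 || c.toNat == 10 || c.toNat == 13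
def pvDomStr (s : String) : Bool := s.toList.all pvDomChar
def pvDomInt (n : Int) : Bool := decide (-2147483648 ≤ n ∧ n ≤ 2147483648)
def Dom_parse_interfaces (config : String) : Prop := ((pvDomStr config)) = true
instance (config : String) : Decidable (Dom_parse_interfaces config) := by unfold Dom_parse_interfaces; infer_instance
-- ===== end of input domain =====

-- B replaces A's running current-interface register with per-line dict appends by a
-- boundary scan: find each header line, scan forward to the next header, and build that
-- section's whole dict entry at once from the slice (objective: alternative decomposition).

-- ===== PORT A =====
-- the branch body of A's loop, after 'line = line.strip()'
def pvAStepCore (st : PySem.Dict String (List String) × Option String) (line : String) :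
    PySem.Dict String (List String) × Option String :=
  if PySem.Str.startswith line "interface" then
    (st.1.insert line [], some line)
  else
    match st.2 with
    | some cur =>
        -- 'elif current_interface and line': both strings must be truthy (non-empty)
        if cur ≠ "" ∧ line ≠ "" then (st.1.modify cur [] (fun v => v ++ [line]), st.2)
        else st
    | none => st

def pvAStep (st : PySem.Dict String (List String) × Option String) (rawLine : String) :
    PySem.Dict String (List String) × Option String :=
  pvAStepCore st (PySem.Str.strip rawLine)

def parse_interfaces (config : String) : List (String × List String) :=
  (((PySem.Str.splitlines config).foldl pvAStep (PySem.Dict.empty, none)).1).items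

-- ===== PORT B =====
def pvIsHeader (l : String) : Bool := PySem.Str.startswith l "interface"

-- inner while loop: advance j past non-header lines ('while j < n and not lines[j].startswith(...)')
def pvFindJ (lines : List String) (j : Nat) : Nat :=
  if h : j < lines.length then
    if !pvIsHeader lines[j] then pvFindJ lines (j + 1) else j
  else j
termination_by lines.length - j
decreasing_by omega

-- the outer loop needs j ≥ its starting point for termination
theorem pvFindJ_ge (lines : List String) (j : Nat) : j ≤ pvFindJ lines j := by
  unfold pvFindJ
  split
  · split
    · have := pvFindJ_ge lines (j + 1); omega
    · omega
  · omega
termination_by lines.length - j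
decreasing_by omega

-- outer while loop over i
def pvBLoop (lines : List String) (i : Nat) (result : PySem.Dict String (List String)) :
    PySem.Dict String (List String) :=
  if h : i < lines.length then
    if pvIsHeader lines[i] then
      let j := pvFindJ lines (i + 1)
      pvBLoop lines j
        (result.insert lines[i]
          ((PySem.List.slice lines (some ((i + 1 : Nat) : Int)) (some ((j : Nat) : Int))).filter
            (fun l => l ≠ "")))
    else pvBLoop lines (i + 1) result
  else result
termination_by lines.length - i
decreasing_by
  · have := pvFindJ_ge lines (i + 1); omega
  · omega

def parse_interfaces_alt (config : String) : List (String × List String) :=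
  (pvBLoop ((PySem.Str.splitlines config).map PySem.Str.strip) 0 PySem.Dict.empty).items

-- ===== PRECONDITION & SPEC =====
def Spec_parse_interfaces (config : String) (out : List (String × List String)) : Prop := out = parse_interfaces_alt config
instance (config : String) (out : List (String × List String)) : Decidable (Spec_parse_interfaces config out) := by unfold Spec_parse_interfaces; infer_instance

-- ===== CLAIM (what is proved, stated in full; the proofs are below) =====
def Claim_equal_parse_interfaces : Prop := ∀ (config : String), Dom_parse_interfaces config → Spec_parse_interfaces config (parse_interfaces config)

-- ===== LEMMAS AND PROOFS =====

-- a header line is non-empty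
theorem pvHeader_ne (l : String) (h : pvIsHeader l = true) : l ≠ "" := by
  intro he; subst he; exact absurd h (by decide)

theorem pvDictExt (d e : PySem.Dict String (List String)) (h : d.items = e.items) : d = e := by
  cases d; cases e; simpa using h

theorem pvMapIdOn {α : Type} (f : α → α) (l : List α) (h : ∀ a ∈ l, f a = a) : l.map f = l := by
  rw [List.map_congr_left h]; simp

-- Dict facts specific to this file: overwriting twice keeps only the second write
theorem pv_insert_insert_self (d : PySem.Dict String (List String)) (k : String)
    (v w : List String) : (d.insert k v).insert k w = d.insert k w := by
  apply pvDictExt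
  by_cases hc : d.contains k = true
  · rw [PySem.Dict.items_insert_of_contains _ w (PySem.Dict.contains_insert_self d k v),
      PySem.Dict.items_insert_of_contains _ v hc,
      PySem.Dict.items_insert_of_contains _ w hc, List.map_map]
    apply List.map_congr_left; intro p _
    by_cases hpk : (p.1 == k) = true <;> simp [hpk, Function.comp]
  · rw [Bool.not_eq_true] at hc
    rw [PySem.Dict.items_insert_of_contains _ w (PySem.Dict.contains_insert_self d k v),
      PySem.Dict.items_insert_of_not_contains _ v hc,
      PySem.Dict.items_insert_of_not_contains _ w hc, List.map_append]
    have hmap : List.map (fun p => if (p.1 == k) = true then (k, w) else p) d.items = d.items := by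
      apply pvMapIdOn; intro p hp
      have hpk : (p.1 == k) = false := by
        have h2 : ∀ (a : String) (b : List String), (a, b) ∈ d.items → ¬a = k := by
          simpa [PySem.Dict.contains] using hc
        have := h2 p.1 p.2 (by simpa using hp)
        simpa using this
      simp [hpk]
    rw [hmap]
    simp

-- rewriting a present key with its own current value is a no-op
theorem pv_insert_getD_self (d : PySem.Dict String (List String)) (k : String) (dflt : List String)
    (hc : d.contains k = true) (hnd : d.keys.Nodup) : d.insert k (d.getD k dflt) = d := by
  apply pvDictExt
  rw [PySem.Dict.items_insert_of_contains _ _ hc]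
  apply pvMapIdOn
  intro p hp
  by_cases hpk : (p.1 == k) = true
  · have hk : p.1 = k := by simpa using hpk
    have hmem : (p.1, p.2) ∈ d.items := by simpa using hp
    have hg : d.get? p.1 = some p.2 := PySem.Dict.get?_of_mem_items d hmem hnd
    rw [if_pos hpk]
    simp only [PySem.Dict.getD, ← hk, hg, Option.getD_some]
  · simp [hpk]

-- modify-after-modify on the same key collapses to one modify
theorem pv_modify_modify (d : PySem.Dict String (List String)) (c : String)
    (xs ys : List String) :
    (d.modify c [] (fun v => v ++ xs)).modify c [] (fun v => v ++ ys)
      = d.modify c [] (fun v => v ++ (xs ++ ys)) := by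
  simp only [PySem.Dict.modify]
  rw [PySem.Dict.getD_insert_self, pv_insert_insert_self, List.append_assoc]

-- '[] then append F' on a freshly inserted key is just inserting F
theorem pv_insert_nil_modify (d : PySem.Dict String (List String)) (l : String) (F : List String) :
    (d.insert l []).modify l [] (fun v => v ++ F) = d.insert l F := by
  simp only [PySem.Dict.modify]
  rw [PySem.Dict.getD_insert_self, pv_insert_insert_self, List.nil_append]

theorem pv_nodup_keys_modify (d : PySem.Dict String (List String)) (c : String)
    (f : List String → List String) (hnd : d.keys.Nodup) : (d.modify c [] f).keys.Nodup := by
  have h := PySem.Dict.keys_modify d c [] f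
  have : (d.insert c (f (d.getD c []))).keys.Nodup := PySem.Dict.nodup_keys_insert _ _ _ hnd
  rw [h]; exact this

-- B's two loops, re-expressed structurally over the stripped line list:
-- per header, the section is takeWhile(non-header), the remainder dropWhile(non-header)
def pvSpecB : List String → PySem.Dict String (List String) → PySem.Dict String (List String)
  | [], d => d
  | l :: rest, d =>
    if pvIsHeader l then
      pvSpecB (rest.dropWhile (fun x => !pvIsHeader x))
        (d.insert l ((rest.takeWhile (fun x => !pvIsHeader x)).filter (fun x => x ≠ "")))
    else pvSpecB rest d
termination_by xs => xs.length
decreasing_by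
  · have := List.length_dropWhile_le (fun x => !pvIsHeader x) rest
    simp only [List.length_cons]; omega
  · simp

-- A's fold, entered mid-section with current key c (present in d, non-empty):
-- it appends exactly the non-empty lines up to the next header, then proceeds as pvSpecB
theorem pvL2 (rest : List String) (d : PySem.Dict String (List String)) (c : String)
    (hcne : c ≠ "") (hc : d.contains c = true) (hnd : d.keys.Nodup) :
    (rest.foldl pvAStepCore (d, some c)).1
      = pvSpecB (rest.dropWhile (fun x => !pvIsHeader x))
          (d.modify c [] (fun v => v ++ (rest.takeWhile (fun x => !pvIsHeader x)).filter (fun x => x ≠ ""))) := by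
  induction rest generalizing d c with
  | nil =>
      simp only [List.foldl_nil, List.dropWhile_nil, List.takeWhile_nil, List.filter_nil]
      show d = pvSpecB [] (d.modify c [] (fun v => v ++ []))
      simp only [pvSpecB, PySem.Dict.modify, List.append_nil]
      exact (pv_insert_getD_self d c [] hc hnd).symm
  | cons l rest ih =>
      by_cases hl : pvIsHeader l = true
      · have hlne : l ≠ "" := pvHeader_ne l hl
        have hsw : PySem.Str.startswith l "interface" = true := hl
        have hstep : pvAStepCore (d, some c) l = (d.insert l [], some l) := by
          simp only [pvAStepCore]; rw [if_pos hsw]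
        rw [List.foldl_cons, hstep,
          List.dropWhile_cons_of_neg (by simp [hl]),
          List.takeWhile_cons_of_neg (by simp [hl]), List.filter_nil]
        rw [ih (d.insert l []) l hlne (PySem.Dict.contains_insert_self d l [])
          (PySem.Dict.nodup_keys_insert d l [] hnd)]
        rw [pv_insert_nil_modify]
        have hmod : d.modify c [] (fun v => v ++ []) = d := by
          simp only [PySem.Dict.modify, List.append_nil]
          exact pv_insert_getD_self d c [] hc hnd
        rw [hmod]
        conv_rhs => rw [pvSpecB]
        rw [if_pos hl]
      · have hsw : PySem.Str.startswith l "interface" = false := by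
          simpa [pvIsHeader] using hl
        rw [List.foldl_cons,
          List.dropWhile_cons_of_pos (by simp [hl]),
          List.takeWhile_cons_of_pos (by simp [hl])]
        by_cases hle : l = ""
        · subst hle
          have hstep : pvAStepCore (d, some c) "" = (d, some c) := by
            simp only [pvAStepCore]
            rw [if_neg (by rw [hsw]; simp), if_neg (by simp)]
          rw [hstep, List.filter_cons_of_neg (by simp)]
          exact ih d c hcne hc hnd
        · have hstep : pvAStepCore (d, some c) l = (d.modify c [] (fun v => v ++ [l]), some c) := by
            simp only [pvAStepCore]
            rw [if_neg (by rw [hsw]; simp), if_pos ⟨hcne, hle⟩]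
          rw [hstep,
            ih _ c hcne (by rw [PySem.Dict.contains_modify]; simp [hc])
              (pv_nodup_keys_modify d c _ hnd),
            pv_modify_modify,
            List.filter_cons_of_pos (by simp [hle])]
          simp only [List.singleton_append]

-- A's fold outside any section (current_interface = None)
theorem pvL1 (ls : List String) (d : PySem.Dict String (List String)) (hnd : d.keys.Nodup) :
    (ls.foldl pvAStepCore (d, none)).1 = pvSpecB ls d := by
  induction ls generalizing d with
  | nil => simp only [List.foldl_nil]; rw [pvSpecB]
  | cons l rest ih =>
      by_cases hl : pvIsHeader l = true
      · have hlne : l ≠ "" := pvHeader_ne l hl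
        have hsw : PySem.Str.startswith l "interface" = true := hl
        have hstep : pvAStepCore (d, none) l = (d.insert l [], some l) := by
          simp only [pvAStepCore]; rw [if_pos hsw]
        rw [List.foldl_cons, hstep]
        rw [pvL2 rest (d.insert l []) l hlne (PySem.Dict.contains_insert_self d l [])
          (PySem.Dict.nodup_keys_insert d l [] hnd)]
        rw [pv_insert_nil_modify]
        conv_rhs => rw [pvSpecB]
        rw [if_pos hl]
      · have hsw : PySem.Str.startswith l "interface" = false := by
          simpa [pvIsHeader] using hl
        have hstep : pvAStepCore (d, none) l = (d, none) := by
          simp only [pvAStepCore]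
          rw [if_neg (by rw [hsw]; simp)]
        rw [List.foldl_cons, hstep, ih d hnd]
        conv_rhs => rw [pvSpecB]
        rw [if_neg hl]

-- the inner while loop computes the takeWhile boundary
theorem pvFindJ_eq (lines : List String) (j : Nat) :
    pvFindJ lines j = j + ((lines.drop j).takeWhile (fun x => !pvIsHeader x)).length := by
  unfold pvFindJ
  split
  · rename_i h
    rw [← List.getElem_cons_drop h, List.takeWhile_cons]
    split
    · rename_i hh
      rw [pvFindJ_eq lines (j + 1)]
      simp only [List.length_cons]
      omega
    · rename_i hh
      simp only [Bool.not_eq_true] at hh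
      simp
  · rename_i h
    rw [List.drop_eq_nil_of_le (by omega)]
    simp
termination_by lines.length - j
decreasing_by omega

theorem pvDropLenTakeWhile {α : Type} (p : α → Bool) (l : List α) :
    l.drop (l.takeWhile p).length = l.dropWhile p := by
  induction l with
  | nil => rfl
  | cons a l ih =>
      by_cases h : p a <;>
        simp [h, ih]

theorem pvDrop_findJ (lines : List String) (j : Nat) :
    lines.drop (pvFindJ lines j) = (lines.drop j).dropWhile (fun x => !pvIsHeader x) := by
  rw [pvFindJ_eq, ← List.drop_drop]
  exact pvDropLenTakeWhile _ _

-- B's index loops equal the structural pvSpecB on the remaining suffix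
theorem pvL3 (lines : List String) (k : Nat) :
    ∀ (i : Nat) (d : PySem.Dict String (List String)), lines.length - i ≤ k →
      pvBLoop lines i d = pvSpecB (lines.drop i) d := by
  induction k with
  | zero =>
      intro i d h
      rw [pvBLoop, dif_neg (by omega), List.drop_eq_nil_of_le (by omega), pvSpecB]
  | succ k ih =>
      intro i d h
      by_cases hi : i < lines.length
      · have hdrop : lines.drop i = lines[i] :: lines.drop (i + 1) := (List.getElem_cons_drop hi).symm
        by_cases hh : pvIsHeader lines[i] = true
        · rw [pvBLoop, dif_pos hi, if_pos hh]
          have hge := pvFindJ_ge lines (i + 1)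
          rw [ih (pvFindJ lines (i + 1)) _ (by omega)]
          rw [pvDrop_findJ]
          have hslice : PySem.List.slice lines (some ((i + 1 : Nat) : Int)) (some ((pvFindJ lines (i + 1) : Nat) : Int))
              = (lines.drop (i + 1)).takeWhile (fun x => !pvIsHeader x) := by
            rw [PySem.List.slice_natCast, pvFindJ_eq]
            have := List.prefix_iff_eq_take.mp
              (List.takeWhile_prefix (l := lines.drop (i + 1)) (fun x => !pvIsHeader x))
            rw [Nat.add_sub_cancel_left, ← this]
          rw [hslice, hdrop]
          conv_rhs => rw [pvSpecB]
          rw [if_pos hh]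
        · rw [pvBLoop, dif_pos hi, if_neg hh, ih (i + 1) d (by omega), hdrop]
          conv_rhs => rw [pvSpecB]
          rw [if_neg hh]
      · rw [pvBLoop, dif_neg hi, List.drop_eq_nil_of_le (by omega), pvSpecB]

-- ===== VERDICT (by name: the statement is the Claim_ definition above) =====
theorem parse_interfaces_spec : Claim_equal_parse_interfaces := by
  intro config _
  show parse_interfaces config = parse_interfaces_alt config
  unfold parse_interfaces parse_interfaces_alt
  rw [pvL3 _ (((PySem.Str.splitlines config).map PySem.Str.strip)).length 0 _ (by omega),
    List.drop_zero]
  rw [show (PySem.Str.splitlines config).foldl pvAStep (PySem.Dict.empty, none)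
      = (((PySem.Str.splitlines config).map PySem.Str.strip)).foldl pvAStepCore (PySem.Dict.empty, none) by
    rw [List.foldl_map]; rfl]
  rw [pvL1 _ _ PySem.Dict.nodup_keys_empty]
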